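-- pv_equiv track=rewrite | github.com/guswns8431/algorithm | 백준/Bronze/21309. Cardinal Adjacencies/Cardinal Adjacencies.py | count_adjacencies
-- ===== SOURCE A (Python) =====
-- def count_adjacencies(grid):
--     rows = len(grid)
--     cols = len(grid[0])
--     cardinal = 0
--     intercardinal = 0
--
--     # 방향 정의 (상,하,좌,우) - cardinal 방향
--     cardinal_dirs = [(-1,0), (1,0), (0,-1), (0,1)]
--
--     # 방향 정의 (대각선 포함) - intercardinal 방향
--     intercardinal_dirs = [(-1,0), (1,0), (0,-1), (0,1),
--                          (-1,-1), (-1,1), (1,-1), (1,1)]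
--
--     # 격자의 각 셀을 확인
--     for i in range(rows):
--         for j in range(cols):
--             # 현재 셀이 땅인 경우에만 확인
--             if grid[i][j] == 1:
--                 # Cardinal 인접 확인
--                 for di, dj in cardinal_dirs:
--                     ni, nj = i + di, j + dj
--                     if 0 <= ni < rows and 0 <= nj < cols and grid[ni][nj] == 1:
--                         cardinal += 1
--
--                 # Intercardinal 인접 확인
--                 for di, dj in intercardinal_dirs:
--                     ni, nj = i + di, j + dj
--                     if 0 <= ni < rows and 0 <= nj < cols and grid[ni][nj] == 1:
--                         intercardinal += 1
--
--     # cardinal은 각 edge가 두 번 카운트되므로 2로 나눔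
--     return cardinal // 2, intercardinal // 2
-- ===== SOURCE B (Python) =====
-- def count_adjacencies(grid):
--     rows = len(grid)
--     cols = len(grid[0])
--     # count each adjacent pair once, by scanning pairs instead of neighborhoods
--     horiz = sum(1 for i in range(rows) for j in range(cols - 1)
--                 if grid[i][j] == 1 and grid[i][j + 1] == 1)
--     vert = sum(1 for i in range(rows - 1) for j in range(cols)
--                if grid[i][j] == 1 and grid[i + 1][j] == 1)
--     diag_dr = sum(1 for i in range(rows - 1) for j in range(cols - 1)
--                   if grid[i][j] == 1 and grid[i + 1][j + 1] == 1)
--     diag_dl = sum(1 for i in range(rows - 1) for j in range(cols - 1)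
--                   if grid[i][j + 1] == 1 and grid[i + 1][j] == 1)
--     cardinal = horiz + vert
--     return cardinal, cardinal + diag_dr + diag_dl
-- ===== Notes on version B (the rewrite author's own statement) =====
-- stated objective: alternative
-- what changed: B scans adjacent cell PAIRS (horizontal, vertical and two diagonal passes), counting each edge exactly once with no //2, instead of A's per-cell scan over 4- and 8-neighbourhoods that counts every edge twice and halves.
import Mathlib
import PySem

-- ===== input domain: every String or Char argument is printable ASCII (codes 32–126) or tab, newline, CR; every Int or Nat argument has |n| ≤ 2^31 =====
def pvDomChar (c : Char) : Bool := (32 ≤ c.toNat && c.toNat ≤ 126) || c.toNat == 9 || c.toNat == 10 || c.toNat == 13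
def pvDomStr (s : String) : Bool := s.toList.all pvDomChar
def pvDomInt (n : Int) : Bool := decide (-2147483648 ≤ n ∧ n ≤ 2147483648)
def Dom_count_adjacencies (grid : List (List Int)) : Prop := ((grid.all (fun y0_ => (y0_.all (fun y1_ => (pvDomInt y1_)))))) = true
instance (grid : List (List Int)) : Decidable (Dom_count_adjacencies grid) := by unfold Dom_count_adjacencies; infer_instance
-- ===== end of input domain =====

-- B replaces A's per-cell neighborhood scan (each edge seen twice, then //2) by four single scans
-- over adjacent PAIRS of cells, each edge counted once; equivalence of the return values is proved below.

-- ===== PORT A =====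
-- grid[i][j] (indices produced by range(), hence nonnegative; default irrelevant under Pre_)
def pvCell (grid : List (List Int)) (i j : Int) : Int :=
  PySem.List.pyGetD (PySem.List.pyGetD grid i []) j 0

def count_adjacencies (grid : List (List Int)) : Int × Int :=
  let rows : Int := grid.length
  let cols : Int := (PySem.List.pyGetD grid 0 []).length
  let cardinal_dirs : List (Int × Int) := [(-1,0),(1,0),(0,-1),(0,1)]
  let intercardinal_dirs : List (Int × Int) := [(-1,0),(1,0),(0,-1),(0,1),(-1,-1),(-1,1),(1,-1),(1,1)]
  let res := (PySem.List.pyRange 0 rows 1).foldl (fun st i =>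
      (PySem.List.pyRange 0 cols 1).foldl (fun st j =>
        if pvCell grid i j == 1 then
          (cardinal_dirs.foldl (fun c d =>
              if 0 ≤ i + d.1 ∧ i + d.1 < rows ∧ 0 ≤ j + d.2 ∧ j + d.2 < cols ∧
                 pvCell grid (i + d.1) (j + d.2) == 1
              then c + 1 else c) st.1,
           intercardinal_dirs.foldl (fun c d =>
              if 0 ≤ i + d.1 ∧ i + d.1 < rows ∧ 0 ≤ j + d.2 ∧ j + d.2 < cols ∧
                 pvCell grid (i + d.1) (j + d.2) == 1
              then c + 1 else c) st.2)
        else st) st) ((0:Int), (0:Int))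
  (PySem.Int.floordiv res.1 2, PySem.Int.floordiv res.2 2)

-- ===== PORT B =====
def count_adjacencies_alt (grid : List (List Int)) : Int × Int :=
  let rows : Int := grid.length
  let cols : Int := (PySem.List.pyGetD grid 0 []).length
  let horiz := ((PySem.List.pyRange 0 rows 1).map (fun i =>
      ((PySem.List.pyRange 0 (cols - 1) 1).map (fun j =>
        if pvCell grid i j == 1 && pvCell grid i (j + 1) == 1 then (1:Int) else 0)).sum)).sum
  let vert := ((PySem.List.pyRange 0 (rows - 1) 1).map (fun i =>
      ((PySem.List.pyRange 0 cols 1).map (fun j =>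
        if pvCell grid i j == 1 && pvCell grid (i + 1) j == 1 then (1:Int) else 0)).sum)).sum
  let diag_dr := ((PySem.List.pyRange 0 (rows - 1) 1).map (fun i =>
      ((PySem.List.pyRange 0 (cols - 1) 1).map (fun j =>
        if pvCell grid i j == 1 && pvCell grid (i + 1) (j + 1) == 1 then (1:Int) else 0)).sum)).sum
  let diag_dl := ((PySem.List.pyRange 0 (rows - 1) 1).map (fun i =>
      ((PySem.List.pyRange 0 (cols - 1) 1).map (fun j =>
        if pvCell grid i (j + 1) == 1 && pvCell grid (i + 1) j == 1 then (1:Int) else 0)).sum)).sum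
  let cardinal := horiz + vert
  (cardinal, cardinal + diag_dr + diag_dl)

-- ===== PRECONDITION & SPEC =====
-- Pre_ excludes exactly the inputs where Python A raises: the empty grid (len(grid[0]) → IndexError)
-- and ragged grids with some row shorter than the first (grid[i][j] → IndexError).
def Pre_count_adjacencies (grid : List (List Int)) : Prop :=
  grid ≠ [] ∧ ∀ row ∈ grid, (grid.headD []).length ≤ row.length
instance (grid : List (List Int)) : Decidable (Pre_count_adjacencies grid) := by
  unfold Pre_count_adjacencies; infer_instance
def pvWitness_count_adjacencies : List (List Int) := [[1,1],[1,0]]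

def Spec_count_adjacencies (grid : List (List Int)) (out : Int × Int) : Prop := out = count_adjacencies_alt grid
instance (grid : List (List Int)) (out : Int × Int) : Decidable (Spec_count_adjacencies grid out) := by unfold Spec_count_adjacencies; infer_instance

-- ===== CLAIM (what is proved, stated in full; the proofs are below) =====
def Claim_equal_count_adjacencies : Prop := ∀ (grid : List (List Int)), Dom_count_adjacencies grid → Pre_count_adjacencies grid → Spec_count_adjacencies grid (count_adjacencies grid)

-- ===== LEMMAS AND PROOFS =====

-- land predicate in Nat coordinates (proof-side view of pvCell)
def lnd (g : List (List Int)) (i j : Nat) : Bool := (g.getD i []).getD j 0 == 1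

-- double sum normal form
def ds (R C : Nat) (f : Nat → Nat → Int) : Int :=
  ∑ i ∈ Finset.range R, ∑ j ∈ Finset.range C, f i j

-- the eight directional edge-counts of A, in Nat coordinates
def sU (g : List (List Int)) (R C : Nat) : Int :=
  ds R C (fun i j => if 1 ≤ i ∧ lnd g i j = true ∧ lnd g (i-1) j = true then 1 else 0)
def sD (g : List (List Int)) (R C : Nat) : Int :=
  ds R C (fun i j => if i+1 < R ∧ lnd g i j = true ∧ lnd g (i+1) j = true then 1 else 0)
def sL (g : List (List Int)) (R C : Nat) : Int :=
  ds R C (fun i j => if 1 ≤ j ∧ lnd g i j = true ∧ lnd g i (j-1) = true then 1 else 0)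
def sR (g : List (List Int)) (R C : Nat) : Int :=
  ds R C (fun i j => if j+1 < C ∧ lnd g i j = true ∧ lnd g i (j+1) = true then 1 else 0)
def sUL (g : List (List Int)) (R C : Nat) : Int :=
  ds R C (fun i j => if 1 ≤ i ∧ 1 ≤ j ∧ lnd g i j = true ∧ lnd g (i-1) (j-1) = true then 1 else 0)
def sUR (g : List (List Int)) (R C : Nat) : Int :=
  ds R C (fun i j => if 1 ≤ i ∧ j+1 < C ∧ lnd g i j = true ∧ lnd g (i-1) (j+1) = true then 1 else 0)
def sDL (g : List (List Int)) (R C : Nat) : Int :=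
  ds R C (fun i j => if i+1 < R ∧ 1 ≤ j ∧ lnd g i j = true ∧ lnd g (i+1) (j-1) = true then 1 else 0)
def sDR (g : List (List Int)) (R C : Nat) : Int :=
  ds R C (fun i j => if i+1 < R ∧ j+1 < C ∧ lnd g i j = true ∧ lnd g (i+1) (j+1) = true then 1 else 0)

-- B's four pair-counts in Nat coordinates
def bH (g : List (List Int)) (R C : Nat) : Int :=
  ds R (C-1) (fun i j => if lnd g i j = true ∧ lnd g i (j+1) = true then 1 else 0)
def bV (g : List (List Int)) (R C : Nat) : Int :=
  ds (R-1) C (fun i j => if lnd g i j = true ∧ lnd g (i+1) j = true then 1 else 0)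
def bDR (g : List (List Int)) (R C : Nat) : Int :=
  ds (R-1) (C-1) (fun i j => if lnd g i j = true ∧ lnd g (i+1) (j+1) = true then 1 else 0)
def bDL (g : List (List Int)) (R C : Nat) : Int :=
  ds (R-1) (C-1) (fun i j => if lnd g i (j+1) = true ∧ lnd g (i+1) j = true then 1 else 0)

theorem lsum (n : Nat) (f : Nat → Int) : ((List.range n).map f).sum = ∑ i ∈ Finset.range n, f i := by
  rfl

theorem shift_sum (n : Nat) (Q : Nat → Int) :
    ∑ i ∈ Finset.range n, (if 1 ≤ i then Q (i-1) else 0)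
      = ∑ i ∈ Finset.range n, (if i + 1 < n then Q i else 0) := by
  cases n with
  | zero => rfl
  | succ m =>
    rw [Finset.sum_range_succ' (fun i => if 1 ≤ i then Q (i-1) else 0), Finset.sum_range_succ]
    rw [if_neg (by omega), if_neg (by omega), add_zero, add_zero]
    exact Finset.sum_congr rfl (fun i hi => by
      have := Finset.mem_range.mp hi
      rw [if_pos (by omega), if_pos (by omega), Nat.add_sub_cancel])

theorem trim_sum (n : Nat) (f : Nat → Int) :
    ∑ i ∈ Finset.range n, (if i + 1 < n then f i else 0) = ∑ i ∈ Finset.range (n - 1), f i := by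
  cases n with
  | zero => rfl
  | succ m =>
    rw [Finset.sum_range_succ, if_neg (by omega), add_zero, Nat.add_sub_cancel]
    exact Finset.sum_congr rfl (fun i hi => by
      rw [if_pos (have := Finset.mem_range.mp hi; by omega)])

theorem sum_if_and (c : Prop) [Decidable c] (C : Nat) (P : Nat → Prop) [DecidablePred P] :
    ∑ j ∈ Finset.range C, (if c ∧ P j then (1:Int) else 0)
      = if c then ∑ j ∈ Finset.range C, (if P j then (1:Int) else 0) else 0 := by
  by_cases h : c <;> simp [h]

theorem ite_and_one (c p : Prop) [Decidable c] [Decidable p] :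
    (if c ∧ p then (1:Int) else 0) = if c then (if p then (1:Int) else 0) else 0 := by
  by_cases h : c <;> simp [h]

theorem pvCell_nat (g : List (List Int)) (i j : Nat) :
    (pvCell g (i:Int) (j:Int) == 1) = lnd g i j := by
  simp [pvCell, lnd, PySem.List.pyGetD_natCast]

theorem cast_succ (i : Nat) : ((i:Int) + 1) = ((i+1 : Nat) : Int) := by push_cast; ring

theorem foldl_ite_add {β : Type} (l : List β) (p : β → Prop) [DecidablePred p] (a : Int) :
    l.foldl (fun c d => if p d then c + 1 else c) a
      = a + (l.map (fun d => if p d then (1:Int) else 0)).sum := by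
  rw [show (fun (c:Int) d => if p d then c + 1 else c)
        = (fun c d => c + if p d then (1:Int) else 0) from by funext c d; split <;> simp]
  exact PySem.List.foldl_add l _ a

theorem pairstep_eq {β : Type} (q : β → Prop) [DecidablePred q] (f1 f2 : β → Int) :
    (fun (st : Int × Int) j => if q j then (st.1 + f1 j, st.2 + f2 j) else st)
      = (fun st j => (st.1 + (if q j then f1 j else 0), st.2 + (if q j then f2 j else 0))) := by
  funext st j; by_cases h : q j <;> simp [h]

theorem foldl_pair_add {β : Type} (l : List β) (f1 f2 : β → Int) (st : Int × Int) :
    l.foldl (fun s e => (s.1 + f1 e, s.2 + f2 e)) st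
      = (st.1 + (l.map f1).sum, st.2 + (l.map f2).sum) := by
  cases st with
  | mk a b =>
    rw [PySem.List.foldl_prod_mk (fun x e => x + f1 e) (fun x e => x + f2 e) l a b,
      PySem.List.foldl_add, PySem.List.foldl_add]

theorem tdir_eq (g : List (List Int)) (R C i j a b : Nat) (di dj : Int) (cnd : Prop) [Decidable cnd]
    (hcnd : cnd ↔ (0 ≤ (i:Int)+di ∧ (i:Int)+di < (R:Int) ∧ 0 ≤ (j:Int)+dj ∧ (j:Int)+dj < (C:Int)))
    (ha : cnd → (i:Int)+di = (a:Int)) (hb : cnd → (j:Int)+dj = (b:Int)) :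
    (if 0 ≤ (i:Int)+di ∧ (i:Int)+di < (R:Int) ∧ 0 ≤ (j:Int)+dj ∧ (j:Int)+dj < (C:Int) ∧
        (pvCell g ((i:Int)+di) ((j:Int)+dj) == 1) = true then (1:Int) else 0)
      = if cnd ∧ lnd g a b = true then 1 else 0 := by
  by_cases h : cnd
  · have hfacts := hcnd.mp h
    have haR : (a:Int) < (R:Int) := (ha h) ▸ hfacts.2.1
    have hbC : (b:Int) < (C:Int) := (hb h) ▸ hfacts.2.2.2
    simp only [ha h, hb h, pvCell_nat]
    simp [h, haR, hbC]
  · rw [if_neg (fun hc => h (hcnd.mpr ⟨hc.1, hc.2.1, hc.2.2.1, hc.2.2.2.1⟩)),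
        if_neg (fun hc => h hc.1)]

theorem aNF (g : List (List Int)) :
    count_adjacencies g =
      (PySem.Int.floordiv (sU g g.length (g.getD 0 []).length + sD g g.length (g.getD 0 []).length
          + sL g g.length (g.getD 0 []).length + sR g g.length (g.getD 0 []).length) 2,
       PySem.Int.floordiv ((sU g g.length (g.getD 0 []).length + sD g g.length (g.getD 0 []).length
          + sL g g.length (g.getD 0 []).length + sR g g.length (g.getD 0 []).length)
          + (sUL g g.length (g.getD 0 []).length + sUR g g.length (g.getD 0 []).length
          + sDL g g.length (g.getD 0 []).length + sDR g g.length (g.getD 0 []).length)) 2) := by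
  conv_lhs => unfold count_adjacencies
  simp only [foldl_ite_add, List.map_cons, List.map_nil, List.sum_cons, List.sum_nil,
    pairstep_eq, foldl_pair_add,
    PySem.List.pyGetD_zero, PySem.List.pyRange_zero, List.map_map, Int.toNat_natCast,
    Function.comp_def, lsum, zero_add]
  unfold sU sD sL sR sUL sUR sDL sDR ds
  beta_reduce
  simp only [← Finset.sum_add_distrib]
  rw [Prod.mk.injEq]
  constructor
  · congr 1
    refine Finset.sum_congr rfl (fun i hi => Finset.sum_congr rfl (fun j hj => ?_))
    have hi' := Finset.mem_range.mp hi
    have hj' := Finset.mem_range.mp hj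
    rw [tdir_eq g g.length (g.getD 0 []).length i j (i-1) j (-1) 0 (1 ≤ i)
          (by constructor <;> omega) (fun h => by omega) (fun h => by omega),
        tdir_eq g g.length (g.getD 0 []).length i j (i+1) j 1 0 (i+1 < g.length)
          (by constructor <;> omega) (fun h => by omega) (fun h => by omega),
        tdir_eq g g.length (g.getD 0 []).length i j i (j-1) 0 (-1) (1 ≤ j)
          (by constructor <;> omega) (fun h => by omega) (fun h => by omega),
        tdir_eq g g.length (g.getD 0 []).length i j i (j+1) 0 1 (j+1 < (g.getD 0 []).length)
          (by constructor <;> omega) (fun h => by omega) (fun h => by omega)]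
    by_cases hl : lnd g i j = true
    · simp only [pvCell_nat, hl, if_true, true_and]
      ring
    · simp [pvCell_nat, hl]
  · congr 1
    refine Finset.sum_congr rfl (fun i hi => Finset.sum_congr rfl (fun j hj => ?_))
    have hi' := Finset.mem_range.mp hi
    have hj' := Finset.mem_range.mp hj
    rw [tdir_eq g g.length (g.getD 0 []).length i j (i-1) j (-1) 0 (1 ≤ i)
          (by constructor <;> omega) (fun h => by omega) (fun h => by omega),
        tdir_eq g g.length (g.getD 0 []).length i j (i+1) j 1 0 (i+1 < g.length)
          (by constructor <;> omega) (fun h => by omega) (fun h => by omega),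
        tdir_eq g g.length (g.getD 0 []).length i j i (j-1) 0 (-1) (1 ≤ j)
          (by constructor <;> omega) (fun h => by omega) (fun h => by omega),
        tdir_eq g g.length (g.getD 0 []).length i j i (j+1) 0 1 (j+1 < (g.getD 0 []).length)
          (by constructor <;> omega) (fun h => by omega) (fun h => by omega),
        tdir_eq g g.length (g.getD 0 []).length i j (i-1) (j-1) (-1) (-1) (1 ≤ i ∧ 1 ≤ j)
          (by constructor <;> omega) (fun h => by omega) (fun h => by omega),
        tdir_eq g g.length (g.getD 0 []).length i j (i-1) (j+1) (-1) 1 (1 ≤ i ∧ j+1 < (g.getD 0 []).length)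
          (by constructor <;> omega) (fun h => by omega) (fun h => by omega),
        tdir_eq g g.length (g.getD 0 []).length i j (i+1) (j-1) 1 (-1) (i+1 < g.length ∧ 1 ≤ j)
          (by constructor <;> omega) (fun h => by omega) (fun h => by omega),
        tdir_eq g g.length (g.getD 0 []).length i j (i+1) (j+1) 1 1 (i+1 < g.length ∧ j+1 < (g.getD 0 []).length)
          (by constructor <;> omega) (fun h => by omega) (fun h => by omega)]
    by_cases hl : lnd g i j = true
    · simp only [pvCell_nat, hl, if_true, true_and, and_assoc]
      ring
    · simp [pvCell_nat, hl]


theorem bNF (g : List (List Int)) :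
    count_adjacencies_alt g =
      (bH g g.length (g.getD 0 []).length + bV g g.length (g.getD 0 []).length,
       bH g g.length (g.getD 0 []).length + bV g g.length (g.getD 0 []).length
         + bDR g g.length (g.getD 0 []).length + bDL g g.length (g.getD 0 []).length) := by
  unfold count_adjacencies_alt bH bV bDR bDL ds
  have hR : ((g.length : Int) - 1).toNat = g.length - 1 := by omega
  have hC : (((g.getD 0 []).length : Int) - 1).toNat = (g.getD 0 []).length - 1 := by omega
  simp only [PySem.List.pyGetD_zero, PySem.List.pyRange_zero, List.map_map, Int.toNat_natCast,
    hR, hC, Function.comp_def, cast_succ, pvCell_nat, Bool.and_eq_true, lsum]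

theorem sU_eq_sD (g : List (List Int)) (R C : Nat) : sU g R C = sD g R C := by
  unfold sU sD ds
  have key := shift_sum R (fun a => ∑ j ∈ Finset.range C,
    (if lnd g a j = true ∧ lnd g (a+1) j = true then (1:Int) else 0))
  beta_reduce
  refine (Finset.sum_congr rfl (fun i _ => ?_)).trans (key.trans (Finset.sum_congr rfl (fun i _ => ?_)))
  · (
      rw [sum_if_and (1 ≤ i) C (fun j => lnd g i j = true ∧ lnd g (i-1) j = true)]
      by_cases hi : 1 ≤ i
      · rw [if_pos hi, if_pos hi]
        have h1 : i - 1 + 1 = i := by omega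
        rw [h1]
        exact Finset.sum_congr rfl (fun j _ => if_congr and_comm rfl rfl)
      · rw [if_neg hi, if_neg hi])
  · exact (sum_if_and (i+1 < R) C (fun j => lnd g i j = true ∧ lnd g (i+1) j = true)).symm
theorem sL_eq_sR (g : List (List Int)) (R C : Nat) : sL g R C = sR g R C := by
  unfold sL sR ds
  beta_reduce
  refine Finset.sum_congr rfl (fun i _ => ?_)
  have key := shift_sum C (fun a => if lnd g i a = true ∧ lnd g i (a+1) = true then (1:Int) else 0)
  refine (Finset.sum_congr rfl (fun j _ => ?_)).trans (key.trans (Finset.sum_congr rfl (fun j _ => ?_)))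
  · rw [ite_and_one]
    by_cases hj : 1 ≤ j
    · rw [if_pos hj, if_pos hj, (by omega : j - 1 + 1 = j)]
      exact if_congr and_comm rfl rfl
    · rw [if_neg hj, if_neg hj]
  · exact (ite_and_one _ _).symm
theorem sUL_eq_sDR (g : List (List Int)) (R C : Nat) : sUL g R C = sDR g R C := by
  unfold sUL sDR ds
  beta_reduce
  have key := shift_sum R (fun a => ∑ j ∈ Finset.range C,
    (if 1 ≤ j ∧ lnd g (a+1) j = true ∧ lnd g a (j-1) = true then (1:Int) else 0))
  refine (Finset.sum_congr rfl (fun i _ => ?_)).trans (key.trans (Finset.sum_congr rfl (fun i _ => ?_)))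
  · rw [sum_if_and (1 ≤ i) C (fun j => 1 ≤ j ∧ lnd g i j = true ∧ lnd g (i-1) (j-1) = true)]
    by_cases hi : 1 ≤ i
    · rw [if_pos hi, if_pos hi, (by omega : i - 1 + 1 = i)]
    · rw [if_neg hi, if_neg hi]
  · rw [sum_if_and (i+1 < R) C (fun j => j+1 < C ∧ lnd g i j = true ∧ lnd g (i+1) (j+1) = true)]
    refine if_congr Iff.rfl ?_ rfl
    have keyj := shift_sum C (fun a => if lnd g i a = true ∧ lnd g (i+1) (a+1) = true then (1:Int) else 0)
    refine (Finset.sum_congr rfl (fun j _ => ?_)).trans (keyj.trans (Finset.sum_congr rfl (fun j _ => ?_)))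
    · rw [ite_and_one]
      by_cases hj : 1 ≤ j
      · rw [if_pos hj, if_pos hj, (by omega : j - 1 + 1 = j)]
        exact if_congr and_comm rfl rfl
      · rw [if_neg hj, if_neg hj]
    · exact (ite_and_one _ _).symm
theorem sUR_eq_sDL (g : List (List Int)) (R C : Nat) : sUR g R C = sDL g R C := by
  unfold sUR sDL ds
  beta_reduce
  have key := shift_sum R (fun a => ∑ j ∈ Finset.range C,
    (if j+1 < C ∧ lnd g (a+1) j = true ∧ lnd g a (j+1) = true then (1:Int) else 0))
  refine (Finset.sum_congr rfl (fun i _ => ?_)).trans (key.trans (Finset.sum_congr rfl (fun i _ => ?_)))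
  · rw [sum_if_and (1 ≤ i) C (fun j => j+1 < C ∧ lnd g i j = true ∧ lnd g (i-1) (j+1) = true)]
    by_cases hi : 1 ≤ i
    · rw [if_pos hi, if_pos hi, (by omega : i - 1 + 1 = i)]
    · rw [if_neg hi, if_neg hi]
  · rw [sum_if_and (i+1 < R) C (fun j => 1 ≤ j ∧ lnd g i j = true ∧ lnd g (i+1) (j-1) = true)]
    refine if_congr Iff.rfl ?_ rfl
    have keyj := shift_sum C (fun a => if lnd g i (a+1) = true ∧ lnd g (i+1) a = true then (1:Int) else 0)
    refine (Finset.sum_congr rfl (fun j _ => ?_)).trans (keyj.symm.trans (Finset.sum_congr rfl (fun j _ => ?_)))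
    · rw [ite_and_one]
      exact if_congr Iff.rfl (if_congr and_comm rfl rfl) rfl
    · rw [ite_and_one (1 ≤ j) (lnd g i j = true ∧ lnd g (i+1) (j-1) = true)]
      by_cases hj : 1 ≤ j
      · rw [if_pos hj, if_pos hj, (by omega : j - 1 + 1 = j)]
      · rw [if_neg hj, if_neg hj]
theorem sD_eq_bV (g : List (List Int)) (R C : Nat) : sD g R C = bV g R C := by
  unfold sD bV ds
  beta_reduce
  exact (Finset.sum_congr rfl (fun i _ =>
    sum_if_and (i+1 < R) C (fun j => lnd g i j = true ∧ lnd g (i+1) j = true))).trans (trim_sum R _)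
theorem sR_eq_bH (g : List (List Int)) (R C : Nat) : sR g R C = bH g R C := by
  unfold sR bH ds
  beta_reduce
  exact Finset.sum_congr rfl (fun i _ =>
    (Finset.sum_congr rfl (fun j _ => ite_and_one _ _)).trans (trim_sum C _))
theorem sDR_eq_bDR (g : List (List Int)) (R C : Nat) : sDR g R C = bDR g R C := by
  unfold sDR bDR ds
  beta_reduce
  refine (Finset.sum_congr rfl (fun i _ =>
    sum_if_and (i+1 < R) C (fun j => j+1 < C ∧ lnd g i j = true ∧ lnd g (i+1) (j+1) = true))).trans
    ((trim_sum R _).trans (Finset.sum_congr rfl (fun i _ => ?_)))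
  exact (Finset.sum_congr rfl (fun j _ => ite_and_one _ _)).trans (trim_sum C _)
theorem sDL_eq_bDL (g : List (List Int)) (R C : Nat) : sDL g R C = bDL g R C := by
  unfold sDL bDL ds
  beta_reduce
  refine (Finset.sum_congr rfl (fun i _ =>
    sum_if_and (i+1 < R) C (fun j => 1 ≤ j ∧ lnd g i j = true ∧ lnd g (i+1) (j-1) = true))).trans
    ((trim_sum R _).trans (Finset.sum_congr rfl (fun i _ => ?_)))
  have keyj := shift_sum C (fun a => if lnd g i (a+1) = true ∧ lnd g (i+1) a = true then (1:Int) else 0)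
  refine (Finset.sum_congr rfl (fun j _ => ?_)).trans (keyj.trans (trim_sum C _))
  rw [ite_and_one]
  by_cases hj : 1 ≤ j
  · rw [if_pos hj, if_pos hj, (by omega : j - 1 + 1 = j)]
  · rw [if_neg hj, if_neg hj]

-- ===== VERDICT (by name: the statement is the Claim_ definition above) =====
theorem count_adjacencies_spec : Claim_equal_count_adjacencies := by
  intro grid _ _
  unfold Spec_count_adjacencies
  rw [aNF, bNF, sU_eq_sD, sL_eq_sR, sUL_eq_sDR, sUR_eq_sDL, sD_eq_bV, sR_eq_bH, sDR_eq_bDR, sDL_eq_bDL]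
  have h2 : ∀ x : Int, PySem.Int.floordiv (2 * x) 2 = x := by
    intro x
    rw [PySem.Int.floordiv_eq_ediv_of_pos (by norm_num)]
    omega
  set vH := bH grid grid.length (grid.getD 0 []).length with hH
  set vV := bV grid grid.length (grid.getD 0 []).length with hV
  set vR := bDR grid grid.length (grid.getD 0 []).length with hR
  set vL := bDL grid grid.length (grid.getD 0 []).length with hL
  rw [show vV + vV + vH + vH = 2 * (vH + vV) from by ring,
      show 2 * (vH + vV) + (vR + vL + vL + vR) = 2 * (vH + vV + vR + vL) from by ring,
      h2, h2]
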